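-- pv_equiv track=rewrite | github.com/HwangToeMat/Algorithm | 프로그래머스/카카오기출/괄호변환.py | sep
-- ===== SOURCE A (Python) =====
-- def sep(lst):
--     if lst == []:
--         return ''
--     elif lst == [1, -1] or lst == [-1, 1]:
--         return '()'
--     elif cor(lst):
--         return rev(lst)
--     ans = ''
--     for i in range(2, len(lst)+1):
--         if bal(lst[:i]):
--             if cor(lst[:i]):
--                 return rev(lst[:i]) + sep(lst[i:])
--             else:
--                 return '(' + sep(lst[i:]) + ')' + rev(list(map(lambda x: (-1)*x, lst[1:i-1])))
--     return ans
--
-- def bal(lst):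
--     if sum(lst) == 0:
--         return True
--     else:
--         return False
--
-- def cor(lst):
--     tmp = 0
--     if sum(lst) == 0:
--         for _ in lst:
--             tmp += _
--             if tmp < 0:
--                 return False
--         return True
--     else:
--         return False
--
-- def rev(lst):
--     tmp = ''
--     for _ in lst:
--         if _ == 1:
--             tmp += '('
--         else:
--             tmp += ')'
--     return tmp
-- ===== SOURCE B (Python) =====
-- def sep(lst):
--     if not lst:
--         return ''
--     # one pass: running balance s, whether any prefix sum went negative,
--     # and the first split point i >= 2 where the balance returns to 0
--     s = 0
--     neg = False
--     cut = None
--     for i, x in enumerate(lst, 1):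
--         s += x
--         if s < 0:
--             neg = True
--         if cut is None and s == 0 and i >= 2:
--             cut = (i, neg)
--     if s == 0 and not neg:
--         return ''.join('(' if x == 1 else ')' for x in lst)
--     if cut is None:
--         return ''
--     i, cneg = cut
--     u, v = lst[:i], lst[i:]
--     if not cneg:
--         return ''.join('(' if x == 1 else ')' for x in u) + sep(v)
--     return '(' + sep(v) + ')' + ''.join('(' if -x == 1 else ')' for x in u[1:-1])
-- ===== Notes on version B (the rewrite author's own statement) =====
-- stated objective: faster
-- what changed: B finds the first balanced prefix with a single running-balance pass (also tracking whether any prefix balance went negative), instead of re-summing every prefix lst[:i] and re-scanning it with cor() inside the loop.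
import Mathlib
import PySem

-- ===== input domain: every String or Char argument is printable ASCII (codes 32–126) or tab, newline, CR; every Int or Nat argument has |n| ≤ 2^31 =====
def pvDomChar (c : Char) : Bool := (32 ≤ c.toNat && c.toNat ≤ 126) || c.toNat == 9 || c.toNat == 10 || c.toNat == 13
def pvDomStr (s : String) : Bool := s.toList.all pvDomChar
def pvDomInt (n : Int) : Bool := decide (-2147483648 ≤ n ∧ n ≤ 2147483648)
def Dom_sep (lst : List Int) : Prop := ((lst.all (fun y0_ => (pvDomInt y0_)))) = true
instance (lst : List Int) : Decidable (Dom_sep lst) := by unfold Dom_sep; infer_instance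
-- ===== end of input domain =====

-- B replaces A's quadratic prefix re-summing with one running-balance pass per level; return value only, no mutation.

-- ===== PORT A =====
-- bal(lst)
def pyBal (l : List Int) : Bool := if l.sum = 0 then true else false

-- the loop inside cor(lst): tmp accumulates, early return False on tmp < 0
def corGo : Int → List Int → Bool
  | _, [] => true
  | tmp, x :: r => if tmp + x < 0 then false else corGo (tmp + x) r

-- cor(lst)
def pyCor (l : List Int) : Bool := if l.sum = 0 then corGo 0 l else false

-- rev(lst): builds the string char by char (ported on List Char)
def pyRev (l : List Int) : List Char :=
  l.foldl (fun acc x => acc ++ [if x = 1 then '(' else ')']) []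

-- sep, on List Char (the for-loop with early return = first i in range(2, len+1) with bal(lst[:i]))
def sepC (lst : List Int) : List Char :=
  if lst = [] then []
  else if lst = [1, -1] ∨ lst = [-1, 1] then ['(', ')']
  else if pyCor lst then pyRev lst
  else
    match h : (PySem.List.pyRange 2 (PySem.List.len lst + 1) 1).find?
        (fun i => pyBal (PySem.List.slice lst (some 0) (some i))) with
    | none => []
    | some i =>
        if pyCor (PySem.List.slice lst (some 0) (some i)) then
          pyRev (PySem.List.slice lst (some 0) (some i)) ++ sepC (PySem.List.slice lst (some i) none)
        else
          ['('] ++ sepC (PySem.List.slice lst (some i) none) ++ [')'] ++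
            pyRev ((PySem.List.slice lst (some 1) (some (i - 1))).map (fun x => (-1) * x))
termination_by lst.length
decreasing_by
  all_goals
    have hmem := List.mem_of_find?_eq_some h
    rw [PySem.List.mem_pyRange_one] at hmem
    rw [PySem.List.slice_from lst (by omega)]
    simp only [List.length_drop]
    simp only [PySem.List.len_eq] at hmem
    omega

def sep (lst : List Int) : String := String.ofList (sepC lst)

-- ===== PORT B =====
-- the single pass: running sum s, neg flag, first cut (i, neg-at-cut) with i ≥ 2 and s = 0
def scanGo : List Int → Nat → Int → Bool → Option (Nat × Bool) → Int × Bool × Option (Nat × Bool)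
  | [], _, s, neg, cut => (s, neg, cut)
  | x :: r, i, s, neg, cut =>
      let s' := s + x
      let neg' := neg || decide (s' < 0)
      let cut' := if cut = none ∧ s' = 0 ∧ 2 ≤ i then some (i, neg') else cut
      scanGo r (i + 1) s' neg' cut'

-- ''.join('(' if x == 1 else ')' for x in l)
def revChars (l : List Int) : List Char := l.map (fun x => if x = 1 then '(' else ')')

-- needed by sep_altC's termination: the recorded cut index is at least the running index
theorem scanGo_cut_ge (l : List Int) : ∀ (i0 : Nat) (s : Int) (neg : Bool)
    (cut : Option (Nat × Bool)) (i : Nat) (b : Bool),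
    (scanGo l i0 s neg cut).2.2 = some (i, b) → cut = some (i, b) ∨ i0 ≤ i := by
  induction l with
  | nil => intro i0 s neg cut i b h; exact Or.inl h
  | cons x r ih =>
      intro i0 s neg cut i b h
      simp only [scanGo] at h
      rcases ih (i0 + 1) (s + x) (neg || decide (s + x < 0)) _ i b h with h' | h'
      · split at h'
        · exact Or.inr (by simp_all)
        · exact Or.inl h'
      · exact Or.inr (by omega)

def sepC_alt (lst : List Int) : List Char :=
  if lst = [] then []
  else
    let t := scanGo lst 1 0 false none
    if t.1 = 0 ∧ t.2.1 = false then revChars lst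
    else
      match h : t.2.2 with
      | none => []
      | some (i, cneg) =>
          if cneg = false then
            revChars (lst.take i) ++ sepC_alt (lst.drop i)
          else
            ['('] ++ sepC_alt (lst.drop i) ++ [')'] ++
              (((lst.take i).drop 1).dropLast.map (fun x => if -x = 1 then '(' else ')'))
termination_by lst.length
decreasing_by
  all_goals
    rcases scanGo_cut_ge lst 1 0 false none i cneg h with h' | h'
    · exact absurd h' (by simp)
    · simp only [List.length_drop]
      rename_i hne _ _
      have : lst ≠ [] := hne
      have : 0 < lst.length := List.length_pos_iff.mpr this
      omega

def sep_alt (lst : List Int) : String := String.ofList (sepC_alt lst)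

-- ===== PRECONDITION & SPEC =====
def Spec_sep (lst : List Int) (out : String) : Prop := out = sep_alt lst
instance (lst : List Int) (out : String) : Decidable (Spec_sep lst out) := by unfold Spec_sep; infer_instance

-- ===== CLAIM (what is proved, stated in full; the proofs are below) =====
def Claim_equal_sep : Prop := ∀ (lst : List Int), Dom_sep lst → Spec_sep lst (sep lst)

-- ===== LEMMAS AND PROOFS =====

-- shift of the "some prefix sum is negative" predicate across a cons
theorem exShift (s x : Int) (r : List Int) :
    ((s + x < 0) ∨ ∃ n, n < r.length ∧ (s + x) + (r.take (n+1)).sum < 0)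
      ↔ ∃ n, n < r.length + 1 ∧ s + ((x :: r).take (n+1)).sum < 0 := by
  constructor
  · rintro (h | ⟨n, hn, hs⟩)
    · exact ⟨0, by omega, by simpa using h⟩
    · exact ⟨n + 1, by omega, by simpa [add_assoc] using hs⟩
  · rintro ⟨n, hn, hs⟩
    cases n with
    | zero => exact Or.inl (by simpa using hs)
    | succ m => exact Or.inr ⟨m, by omega, by simpa [add_assoc] using hs⟩

-- bounded variant, for the neg-flag recorded at the cut
theorem exShiftLe (s x : Int) (r : List Int) (m : Nat) :
    ((s + x < 0) ∨ ∃ j, j ≤ m ∧ (s + x) + (r.take (j+1)).sum < 0)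
      ↔ ∃ j, j ≤ m + 1 ∧ s + ((x :: r).take (j+1)).sum < 0 := by
  constructor
  · rintro (h | ⟨n, hn, hs⟩)
    · exact ⟨0, by omega, by simpa using h⟩
    · exact ⟨n + 1, by omega, by simpa [add_assoc] using hs⟩
  · rintro ⟨n, hn, hs⟩
    cases n with
    | zero => exact Or.inl (by simpa using hs)
    | succ m => exact Or.inr ⟨m, by omega, by simpa [add_assoc] using hs⟩

-- prefix-sum characterisation of A's cor-loop
theorem corGo_eq (l : List Int) : ∀ (t : Int),
    corGo t l = !decide (∃ n, n < l.length ∧ t + (l.take (n+1)).sum < 0) := by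
  induction l with
  | nil => intro t; simp [corGo]
  | cons x r ih =>
      intro t
      rw [corGo]
      simp only [List.length_cons]
      simp only [show (∃ n < r.length + 1, t + (List.take (n + 1) (x :: r)).sum < 0) ↔
          (t + x < 0 ∨ ∃ n < r.length, t + x + (List.take (n + 1) r).sum < 0) from
        (exShift t x r).symm]
      by_cases h : t + x < 0
      · simp [h]
      · simp [h, ih (t + x)]

theorem pyCor_eq (l : List Int) :
    pyCor l = (decide (l.sum = 0) && !decide (∃ n, n < l.length ∧ (l.take (n+1)).sum < 0)) := by
  unfold pyCor
  by_cases h : l.sum = 0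
  · rw [if_pos h, corGo_eq]
    simp only [zero_add, h, decide_true, Bool.true_and]
  · simp [h]

theorem pyRev_eq (l : List Int) : pyRev l = revChars l := by
  unfold pyRev revChars
  rw [PySem.List.foldl_append_singleton_eq_map]
  simp

-- closed form of the cut that scanGo records (proof-only)
def cutSpec (l : List Int) (i0 : Nat) (s : Int) (neg : Bool) : Option (Nat × Bool) :=
  ((List.range l.length).find? (fun n => decide (s + (l.take (n+1)).sum = 0) && decide (2 ≤ i0 + n))).map
    (fun n => (i0 + n, neg || decide (∃ j, j ≤ n ∧ s + (l.take (j+1)).sum < 0)))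

theorem negShift (s x : Int) (r : List Int) (neg : Bool) :
    (neg || decide (s + x < 0) || decide (∃ n, n < r.length ∧ (s + x) + (r.take (n+1)).sum < 0))
      = (neg || decide (∃ n, n < r.length + 1 ∧ s + ((x :: r).take (n+1)).sum < 0)) := by
  rw [Bool.or_assoc, ← Bool.decide_or]
  simp only [show ((s + x < 0) ∨ ∃ n, n < r.length ∧ (s + x) + (r.take (n+1)).sum < 0)
      ↔ ∃ n, n < r.length + 1 ∧ s + ((x :: r).take (n+1)).sum < 0 from exShift s x r]

theorem scanGo_some (l : List Int) : ∀ (i0 : Nat) (s : Int) (neg : Bool) (c : Nat × Bool),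
    scanGo l i0 s neg (some c) =
      (s + l.sum, neg || decide (∃ n, n < l.length ∧ s + (l.take (n+1)).sum < 0), some c) := by
  induction l with
  | nil => intro i0 s neg c; simp [scanGo]
  | cons x r ih =>
      intro i0 s neg c
      show scanGo r (i0+1) (s+x) (neg || decide (s+x < 0)) (some c) = _
      rw [ih]
      simp only [List.length_cons, List.sum_cons, Prod.mk.injEq]
      exact ⟨by ring, negShift s x r neg, trivial⟩

theorem scanGo_eq (l : List Int) : ∀ (i0 : Nat) (s : Int) (neg : Bool),
    scanGo l i0 s neg none =
      (s + l.sum, neg || decide (∃ n, n < l.length ∧ s + (l.take (n+1)).sum < 0),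
       cutSpec l i0 s neg) := by
  induction l with
  | nil => intro i0 s neg; simp [scanGo, cutSpec]
  | cons x r ih =>
      intro i0 s neg
      by_cases hc : s + x = 0 ∧ 2 ≤ i0
      · show scanGo r (i0+1) (s+x) (neg || decide (s+x < 0))
            (if none = none ∧ s + x = 0 ∧ 2 ≤ i0 then some (i0, neg || decide (s+x<0)) else none) = _
        rw [if_pos ⟨rfl, hc⟩, scanGo_some]
        simp only [List.length_cons, List.sum_cons, Prod.mk.injEq]
        refine ⟨by ring, negShift s x r neg, ?_⟩
        unfold cutSpec
        simp only [List.length_cons, List.range_succ_eq_map, List.find?_cons]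
        have hp : (decide (s + ((x :: r).take (0+1)).sum = 0) && decide (2 ≤ i0 + 0)) = true := by
          simp [hc.1, hc.2]
        rw [hp]
        simp only [Option.map_some]
        refine congrArg some (Prod.ext (by simp) ?_)
        simp only
        congr 1
        simp only [show (∃ j, j ≤ 0 ∧ s + ((x :: r).take (j+1)).sum < 0) ↔ (s + x < 0) by
          constructor
          · rintro ⟨j, hj, hs⟩; interval_cases j; simpa using hs
          · intro h; exact ⟨0, le_refl 0, by simpa using h⟩]
      · show scanGo r (i0+1) (s+x) (neg || decide (s+x < 0))
            (if none = none ∧ s + x = 0 ∧ 2 ≤ i0 then some (i0, neg || decide (s+x<0)) else none) = _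
        rw [if_neg (by tauto), ih]
        simp only [List.length_cons, List.sum_cons, Prod.mk.injEq]
        refine ⟨by ring, negShift s x r neg, ?_⟩
        unfold cutSpec
        simp only [List.length_cons, List.range_succ_eq_map, List.find?_cons]
        have hp : (decide (s + ((x :: r).take (0+1)).sum = 0) && decide (2 ≤ i0 + 0)) = false := by
          simp only [List.take, List.sum_cons, List.sum_nil, add_zero]
          by_cases h1 : s + x = 0 <;> by_cases h2 : 2 ≤ i0 <;> simp_all
        rw [hp]
        simp only [List.find?_map, Option.map_map]
        congr 1
        · funext n
          simp only [Function.comp_def, Nat.succ_eq_add_one, Prod.mk.injEq]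
          refine ⟨by omega, ?_⟩
          rw [Bool.or_assoc, ← Bool.decide_or]
          simp only [show ((s + x < 0) ∨ ∃ j, j ≤ n ∧ (s + x) + (r.take (j+1)).sum < 0)
              ↔ ∃ j, j ≤ n + 1 ∧ s + ((x :: r).take (j+1)).sum < 0 from exShiftLe s x r n]
        · congr 1
          funext n
          simp only [Function.comp_def, Nat.succ_eq_add_one]
          have ht : ((x :: r).take (n + 1 + 1)).sum = x + (r.take (n+1)).sum := by
            simp [List.take_succ_cons]
          rw [ht]
          have h1 : (s + (x + (r.take (n+1)).sum) = 0) ↔ ((s+x) + (r.take (n+1)).sum = 0) := by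
            constructor <;> (intro h; linarith)
          have h2 : (2 ≤ i0 + (n+1)) ↔ (2 ≤ (i0+1) + n) := by omega
          simp only [h1, h2]

-- the cut at the start state, in the same shape as A's find? over range(2, len+1)
theorem cutSpec_start (l : List Int) (hne : l ≠ []) :
    cutSpec l 1 0 false =
      (((List.range (l.length - 1)).find? (fun k => decide ((l.take (k+2)).sum = 0))).map
        (fun k => (k + 2, decide (∃ j, j < k + 2 ∧ (l.take (j+1)).sum < 0)))) := by
  obtain ⟨m, hm⟩ : ∃ m, l.length = m + 1 :=
    ⟨l.length - 1, by have := List.length_pos_iff.mpr hne; omega⟩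
  unfold cutSpec
  rw [hm]
  simp only [Nat.add_sub_cancel]
  rw [List.range_succ_eq_map, List.find?_cons]
  have hp : (decide (0 + (l.take (0+1)).sum = 0) && decide (2 ≤ 1 + 0)) = false := by simp
  rw [hp]
  simp only [List.find?_map, Option.map_map]
  congr 1
  · funext n
    simp only [Function.comp_def, Nat.succ_eq_add_one, Bool.false_or, zero_add, Prod.mk.injEq]
    refine ⟨by omega, ?_⟩
    congr 1
    apply propext
    constructor
    · rintro ⟨j, hj, hs⟩; exact ⟨j, by omega, hs⟩
    · rintro ⟨j, hj, hs⟩; exact ⟨j, by omega, hs⟩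
  · congr 1
    funext n
    simp only [Function.comp_def, Nat.succ_eq_add_one, zero_add]
    have h12 : n + 1 + 1 = n + 2 := by omega
    rw [h12]
    simp
    omega

-- A's loop, rebased to the same find? over List.range
theorem afind_eq (l : List Int) :
    (PySem.List.pyRange 2 (PySem.List.len l + 1) 1).find?
        (fun i => pyBal (PySem.List.slice l (some 0) (some i))) =
      (((List.range (l.length - 1)).find? (fun k => decide ((l.take (k+2)).sum = 0))).map
        (fun k : Nat => (((k + 2 : Nat) : Int)))) := by
  rw [PySem.List.pyRange_one]
  have hL : ((PySem.List.len l + 1 : Int) - 2).toNat = l.length - 1 := by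
    simp [PySem.List.len_eq]; omega
  rw [hL, List.find?_map]
  have hpred : ((fun i => pyBal (PySem.List.slice l (some 0) (some i))) ∘ (fun k : Nat => (2:Int) + (k:Int)))
      = (fun k : Nat => decide ((l.take (k+2)).sum = 0)) := by
    funext k
    simp only [Function.comp_def]
    have h2 : (2 + (k : Int)) = ((k + 2 : Nat) : Int) := by push_cast; ring
    rw [h2, PySem.List.slice_zero_start, PySem.List.slice_to_natCast]
    unfold pyBal
    by_cases h : (l.take (k+2)).sum = 0 <;> simp [h]
  rw [hpred]
  cases List.find? (fun k : Nat => decide ((l.take (k+2)).sum = 0)) (List.range (l.length - 1)) with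
  | none => rfl
  | some k =>
      simp only [Option.map_some, Option.some.injEq]
      push_cast
      ring

-- the three slices A takes at the cut, as take/drop
theorem sliceA0 (l : List Int) (k : Nat) :
    PySem.List.slice l (some 0) (some ((k + 2 : Nat) : Int)) = l.take (k+2) := by
  rw [PySem.List.slice_zero_start, PySem.List.slice_to_natCast]

theorem sliceAfrom (l : List Int) (k : Nat) :
    PySem.List.slice l (some ((k + 2 : Nat) : Int)) none = l.drop (k+2) :=
  PySem.List.slice_from_natCast l (k+2)

theorem sliceAmid (l : List Int) (k : Nat) :
    PySem.List.slice l (some 1) (some (((k + 2 : Nat) : Int) - 1)) = (l.drop 1).take k := by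
  have h2 : some (((k + 2 : Nat) : Int) - 1) = some (((k + 1 : Nat) : Int)) := by
    push_cast; congr 1; ring
  have h1 : some (1 : Int) = some (((1 : Nat) : Int)) := by norm_num
  rw [h2, h1, PySem.List.slice_natCast]
  norm_num

-- B's u[1:-1] at the cut, as the same take/drop
theorem midB (l : List Int) (k : Nat) (h : k + 2 ≤ l.length) :
    ((l.take (k+2)).drop 1).dropLast = (l.drop 1).take k := by
  rw [List.drop_take]
  rw [List.dropLast_eq_take]
  rw [List.take_take]
  congr 1
  simp [List.length_take]
  omega

theorem pyCor_take (l : List Int) (k : Nat) (h : k + 2 ≤ l.length) :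
    pyCor (l.take (k+2)) = (decide ((l.take (k+2)).sum = 0) &&
      !decide (∃ j, j < k + 2 ∧ (l.take (j+1)).sum < 0)) := by
  rw [pyCor_eq]
  congr 2
  congr 1
  apply propext
  have hlen : (l.take (k+2)).length = k + 2 := by simp; omega
  rw [hlen]
  constructor
  · rintro ⟨n, hn, hs⟩
    exact ⟨n, hn, by rwa [List.take_take, min_eq_left (by omega)] at hs⟩
  · rintro ⟨n, hn, hs⟩
    exact ⟨n, hn, by rwa [List.take_take, min_eq_left (by omega)]⟩

theorem sepC_eq_sepC_alt (lst : List Int) : sepC lst = sepC_alt lst := by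
  suffices H : ∀ (N : Nat) (l : List Int), l.length ≤ N → sepC l = sepC_alt l from
    H lst.length lst le_rfl
  intro N
  induction N with
  | zero =>
      intro l hl
      have h0 : l = [] := by cases l <;> simp_all
      subst h0
      rw [sepC, sepC_alt]
      simp
  | succ N ih =>
      intro l hl
      by_cases h0 : l = []
      · subst h0; rw [sepC, sepC_alt]; simp
      by_cases h1 : l = [1, -1] ∨ l = [-1, 1]
      · rcases h1 with h1 | h1 <;> subst h1
        · rw [sepC, sepC_alt]
          norm_num [scanGo, revChars]
        · rw [sepC, sepC_alt]
          have hnil : sepC_alt [] = [] := by rw [sepC_alt]; simp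
          norm_num [scanGo, revChars]
          rw [show (scanGo [-1, 1] 1 0 false none).2.2 = some ((2 : Nat), true) from rfl]
          norm_num [hnil]
      · -- general case
        rw [sepC, sepC_alt]
        rw [if_neg h0, if_neg h1, if_neg h0]
        simp only [scanGo_eq l 1 0 false, pyCor_eq l, zero_add, Bool.false_or]
        have hcut : (scanGo l 1 0 false none).2.2 =
            (((List.range (l.length - 1)).find? (fun k => decide ((l.take (k+2)).sum = 0))).map
              (fun k => (k + 2, decide (∃ j, j < k + 2 ∧ (l.take (j+1)).sum < 0)))) := by
          rw [scanGo_eq]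
          exact cutSpec_start l h0
        rw [hcut, afind_eq l]
        by_cases hcor : l.sum = 0 ∧ ¬(∃ n, n < l.length ∧ (l.take (n+1)).sum < 0)
        · simp only [hcor.1, decide_true, decide_eq_false hcor.2, Bool.true_and, Bool.not_false,
            if_true]
          exact pyRev_eq l
        · have hA : (decide (l.sum = 0) && !decide (∃ n, n < l.length ∧ (l.take (n+1)).sum < 0)) = false := by
            by_cases hs : l.sum = 0 <;> by_cases hn : (∃ n, n < l.length ∧ (l.take (n+1)).sum < 0) <;>
              simp_all
          have hB : ¬(l.sum = 0 ∧ decide (∃ n, n < l.length ∧ (l.take (n+1)).sum < 0) = false) := by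
            by_cases hs : l.sum = 0 <;> by_cases hn : (∃ n, n < l.length ∧ (l.take (n+1)).sum < 0) <;>
              simp_all
          rw [hA, if_neg hB]
          simp only [Bool.false_eq_true, if_false]
          cases hF : (List.range (l.length - 1)).find? (fun k => decide ((l.take (k+2)).sum = 0)) with
          | none => rfl
          | some k =>
              have hk2 : k + 2 ≤ l.length := by
                have := List.mem_range.mp (List.mem_of_find?_eq_some hF); omega
              have hks : (l.take (k+2)).sum = 0 := by simpa using List.find?_some hF
              simp only [Option.map_some]
              rw [sliceA0, sliceAfrom, sliceAmid, pyCor_take l k hk2]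
              have hrec : sepC (l.drop (k+2)) = sepC_alt (l.drop (k+2)) :=
                ih (l.drop (k+2)) (by simp; omega)
              rw [hrec, midB l k hk2, pyRev_eq, pyRev_eq]
              simp only [hks, decide_true, Bool.true_and]
              by_cases hnegk : (∃ j, j < k+2 ∧ (l.take (j+1)).sum < 0)
              · simp only [decide_eq_true hnegk, Bool.not_true, Bool.false_eq_true, if_false]
                unfold revChars
                rw [List.map_map]
                simp only [Function.comp_def, neg_one_mul]
                simp
              · simp only [decide_eq_false hnegk, Bool.not_false, if_true]

-- ===== VERDICT (by name: the statement is the Claim_ definition above) =====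
theorem sep_spec : Claim_equal_sep := by
  intro lst _
  unfold Spec_sep sep sep_alt
  exact congrArg String.ofList (sepC_eq_sepC_alt lst)
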